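-- pv_equiv track=rewrite | github.com/MartinHernandezC/Automatas | kleene.py | kleene
-- ===== SOURCE A (Python) =====
-- def kleene(conjunto, nivel): #Recibimos como parametros conjunto de palabras y nivel (Potencia)
--     if nivel == 0:
--         return {"λ"}
--     elif nivel == 1:
--         return conjunto.copy()
--     else:
--         cerradura_nivel_anterior = kleene(conjunto, nivel - 1) #obtenemos la cerradura de Kleene del nivel anterior
--         resultado = set()  # Inicializamos un conjunto vacío que contendrá el nivel actual
--         for cadena in cerradura_nivel_anterior:  # Iteramos sobre la cerradura del nivel anterior
--             for cadena_anterior in conjunto: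
--                 resultado.add(cadena + cadena_anterior) #Producto Cartesiano entre niveles
--         return resultado
-- ===== SOURCE B (Python) =====
-- def kleene(conjunto, nivel):
--     if nivel == 0:
--         return {"λ"}
--     resultado = conjunto.copy()
--     for _ in range(nivel - 1):
--         resultado = {cadena + w for cadena in resultado for w in conjunto}
--     return resultado
-- ===== Notes on version B (the rewrite author's own statement) =====
-- stated objective: simpler
-- what changed: Replaces A's top-down recursion on nivel with a bottom-up loop that repeats one set-comprehension step nivel-1 times starting from a copy of conjunto.
import Mathlib
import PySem

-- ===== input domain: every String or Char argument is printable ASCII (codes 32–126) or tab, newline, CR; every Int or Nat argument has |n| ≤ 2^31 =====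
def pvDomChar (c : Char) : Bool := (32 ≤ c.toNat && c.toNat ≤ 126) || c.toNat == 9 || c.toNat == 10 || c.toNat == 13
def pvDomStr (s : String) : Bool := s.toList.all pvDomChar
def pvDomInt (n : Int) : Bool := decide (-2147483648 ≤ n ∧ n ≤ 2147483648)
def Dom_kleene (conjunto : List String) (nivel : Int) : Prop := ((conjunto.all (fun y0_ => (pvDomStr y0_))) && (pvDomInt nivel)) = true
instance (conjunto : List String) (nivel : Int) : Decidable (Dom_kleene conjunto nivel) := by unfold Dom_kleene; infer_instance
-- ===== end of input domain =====

-- B replaces A's top-down recursion by a bottom-up loop repeating one set-comprehension step (simpler decomposition, same cost).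

-- ===== PORT A =====
-- A's recursion, phrased on the non-negative levels (negative nivel makes Python A
-- recurse forever — RecursionError — and is excluded by Pre_kleene below).
def kleeneA (conjunto : List String) : Nat → List String
  | 0 => ["λ"]
  | 1 => conjunto
  | n + 2 =>
      -- cerradura_nivel_anterior = kleene(conjunto, nivel - 1)
      let cerradura_nivel_anterior := kleeneA conjunto (n + 1)
      -- resultado = set(); nested for-loops adding cadena + cadena_anterior
      cerradura_nivel_anterior.foldl
        (fun resultado cadena =>
          conjunto.foldl
            (fun resultado cadena_anterior => PySem.Set.add resultado (cadena ++ cadena_anterior))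
            resultado)
        PySem.Set.empty

def kleene (conjunto : List String) (nivel : Int) : List String :=
  kleeneA conjunto nivel.toNat

-- ===== PORT B =====
-- one step: {cadena + w for cadena in resultado for w in conjunto}
def kleeneStep (conjunto resultado : List String) : List String :=
  PySem.Set.ofList (resultado.flatMap (fun cadena => conjunto.map (fun w => cadena ++ w)))

def kleene_alt (conjunto : List String) (nivel : Int) : List String :=
  if nivel = 0 then ["λ"]
  else (List.range (nivel - 1).toNat).foldl (fun resultado _ => kleeneStep conjunto resultado) conjunto

-- ===== PRECONDITION & SPEC =====
-- Pre_ excludes nivel < 0, on which Python A raises RecursionError (infinite recursion).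
def Pre_kleene (conjunto : List String) (nivel : Int) : Prop := 0 ≤ nivel
instance (conjunto : List String) (nivel : Int) : Decidable (Pre_kleene conjunto nivel) := by unfold Pre_kleene; infer_instance
def pvWitness_kleene : List String × Int := (["ab", "c"], 2)

def Spec_kleene (conjunto : List String) (nivel : Int) (out : List String) : Prop := out = kleene_alt conjunto nivel
instance (conjunto : List String) (nivel : Int) (out : List String) : Decidable (Spec_kleene conjunto nivel out) := by unfold Spec_kleene; infer_instance

-- ===== CLAIM (what is proved, stated in full; the proofs are below) =====
def Claim_equal_kleene : Prop := ∀ (conjunto : List String) (nivel : Int), Dom_kleene conjunto nivel → Pre_kleene conjunto nivel → Spec_kleene conjunto nivel (kleene conjunto nivel)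

-- ===== LEMMAS AND PROOFS =====

-- folding Set.add over a flatMap is the nested fold of A's two loops
lemma foldl_add_flatMap (l : List String) (f : String → List String) (init : List String) :
    (l.flatMap f).foldl PySem.Set.add init
      = l.foldl (fun acc x => (f x).foldl PySem.Set.add acc) init := by
  induction l generalizing init with
  | nil => rfl
  | cons h t ih => simp [List.flatMap_cons, List.foldl_append, ih]

-- B's comprehension step is exactly A's nested accumulation into an empty set
lemma kleeneStep_eq (conjunto resultado : List String) :
    kleeneStep conjunto resultado
      = resultado.foldl
          (fun res cadena =>
            conjunto.foldl (fun r w => PySem.Set.add r (cadena ++ w)) res)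
          PySem.Set.empty := by
  unfold kleeneStep
  rw [PySem.Set.ofList_eq_foldl, foldl_add_flatMap]
  simp [List.foldl_map]

-- A's level n+1 is n iterations of B's step starting from conjunto
lemma kleeneA_succ_eq (conjunto : List String) (n : Nat) :
    kleeneA conjunto (n + 1)
      = (List.range n).foldl (fun resultado _ => kleeneStep conjunto resultado) conjunto := by
  induction n with
  | zero => rfl
  | succ k ih =>
      rw [List.range_succ, List.foldl_append, ← ih]
      simp only [List.foldl_cons, List.foldl_nil]
      rw [kleeneStep_eq]
      rfl

-- ===== VERDICT (by name: the statement is the Claim_ definition above) =====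
theorem kleene_spec : Claim_equal_kleene := by
  intro conjunto nivel _ hpre
  unfold Pre_kleene at hpre
  unfold Spec_kleene kleene kleene_alt
  by_cases h0 : nivel = 0
  · subst h0; rfl
  · rw [if_neg h0]
    have h1 : 1 ≤ nivel := by omega
    have : nivel.toNat = (nivel - 1).toNat + 1 := by omega
    rw [this, kleeneA_succ_eq]
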